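-- pv_equiv track=rewrite | github.com/caihaodong111/robot | backend/robots/robot_config_sync.py | _split_weekly_folders
-- ===== SOURCE A (Python) =====
-- def _split_weekly_folders(value) -> list:
--     if not value:
--         return []
--     if isinstance(value, (list, tuple)):
--         return [str(item).strip() for item in value if str(item).strip()]
--     parts = []
--     for raw in str(value).replace("\n", ";").split(";"):
--         parts.extend(raw.split(","))
--     return [item.strip() for item in parts if item.strip()]
-- ===== SOURCE B (Python) =====
-- def _split_weekly_folders(value) -> list:
--     if not value:
--         return []
--     if isinstance(value, (list, tuple)):
--         return [str(item).strip() for item in value if str(item).strip()]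
--     out, cur = [], []
--     for ch in str(value) + ";":
--         if ch in ";,\n":
--             token = "".join(cur).strip()
--             if token:
--                 out.append(token)
--             cur = []
--         else:
--             cur.append(ch)
--     return out
-- ===== Notes on version B (the rewrite author's own statement) =====
-- stated objective: alternative
-- what changed: A's three-pass pipeline (replace newlines with ';', split on ';', re-split every piece on ',', then strip-and-filter) is replaced by a single left-to-right character scan that accumulates the current chunk and emits its stripped form whenever any of the three delimiters is seen.
import Mathlib
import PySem

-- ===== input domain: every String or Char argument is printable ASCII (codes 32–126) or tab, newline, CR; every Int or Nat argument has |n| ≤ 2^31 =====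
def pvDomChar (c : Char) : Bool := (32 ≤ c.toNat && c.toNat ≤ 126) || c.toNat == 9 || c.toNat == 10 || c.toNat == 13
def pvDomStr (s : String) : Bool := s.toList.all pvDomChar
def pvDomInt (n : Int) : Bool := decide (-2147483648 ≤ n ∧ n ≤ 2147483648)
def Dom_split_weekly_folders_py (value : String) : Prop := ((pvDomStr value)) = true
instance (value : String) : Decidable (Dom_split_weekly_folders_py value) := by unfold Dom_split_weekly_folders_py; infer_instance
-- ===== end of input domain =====

-- B replaces A's replace-then-nested-splits pipeline by a single left-to-right character
-- scan that emits each trimmed token as soon as a delimiter is seen (objective: alternative).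

-- ===== PORT A =====
-- Literal transliteration of A on the string's char list (exact via PySem.Chars): replace
-- "\n" by ";", split on ";", extend `parts` with each piece's split on ",", then the final
-- comprehension: strip each part and keep the truthy (non-empty) ones.
def split_weekly_folders_py (value : String) : List String :=
  if value = "" then []
  else
    let parts : List (List Char) :=
      (PySem.Chars.splitOn (PySem.Chars.replace value.toList ['\n'] [';']) [';']).foldl
        (fun acc raw => acc ++ PySem.Chars.splitOn raw [',']) []
    (((parts.map PySem.Chars.strip).filter (fun t => !t.isEmpty)).map String.ofList)

-- ===== PORT B =====
-- transliteration of Source B's `ch in ";,\n"` test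
def pvDelim (c : Char) : Bool := c = ';' || c = ',' || c = '\n'

-- Literal transliteration of B: one fold over the chars of value + ";", carrying the emitted
-- tokens and the current chunk; a delimiter flushes the stripped chunk if it is non-empty.
def split_weekly_folders_py_alt (value : String) : List String :=
  if value = "" then []
  else
    let fin := (value.toList ++ [';']).foldl
      (fun (st : List (List Char) × List Char) ch =>
        if pvDelim ch then
          (if !(PySem.Chars.strip st.2).isEmpty then st.1 ++ [PySem.Chars.strip st.2] else st.1, [])
        else (st.1, st.2 ++ [ch]))
      ([], [])
    fin.1.map String.ofList

-- ===== PRECONDITION & SPEC =====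
def Spec_split_weekly_folders_py (value : String) (out : List String) : Prop := out = split_weekly_folders_py_alt value
instance (value : String) (out : List String) : Decidable (Spec_split_weekly_folders_py value out) := by unfold Spec_split_weekly_folders_py; infer_instance

-- ===== CLAIM (what is proved, stated in full; the proofs are below) =====
def Claim_equal_split_weekly_folders_py : Prop := ∀ (value : String), Dom_split_weekly_folders_py value → Spec_split_weekly_folders_py value (split_weekly_folders_py value)

-- ===== LEMMAS AND PROOFS =====

def pvSplit (d : Char) : List Char → List (List Char)
  | [] => [[]]
  | c :: t => if c = d then [] :: pvSplit d t else (pvSplit d t).modifyHead (c :: ·)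
def pvTok : List Char → List (List Char)
  | [] => [[]]
  | c :: t => if pvDelim c then [] :: pvTok t else (pvTok t).modifyHead (c :: ·)

theorem pvSplit_ne_nil (d : Char) (l : List Char) : pvSplit d l ≠ [] := by
  cases l with
  | nil => simp [pvSplit]
  | cons c t =>
    simp only [pvSplit]
    split_ifs
    · simp
    · intro h
      have := List.modifyHead_eq_nil_iff (l := pvSplit d t) (f := (c :: ·))
      rw [h] at this
      exact pvSplit_ne_nil d t (by simpa using this.mp rfl)

theorem replace_go_single (o n : Char) (l : List Char) :
    ∀ (fuel : Nat) (acc : List Char), l.length ≤ fuel →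
      PySem.Chars.replace.go [o] [n] fuel l acc
        = acc.reverse ++ l.map (fun c => if c = o then n else c) := by
  induction l with
  | nil =>
    intro fuel acc _
    cases fuel with
    | zero => rw [PySem.Chars.replace.go]; simp
    | succ m =>
      rw [PySem.Chars.replace.go]
      · simp
      · omega
  | cons c t ih =>
    intro fuel acc h
    cases fuel with
    | zero => simp at h
    | succ m =>
      rw [PySem.Chars.replace.go]
      by_cases hc : c = o
      · subst hc
        rw [if_pos (by simp [List.isPrefixOf])]
        have hdrop : List.drop [c].length (c :: t) = t := by simp
        rw [hdrop, ih m ([n].reverse ++ acc) (by simp at h ⊢; omega)]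
        simp
      · rw [if_neg (by simp [List.isPrefixOf]; exact fun hdc => (hc hdc.symm).elim)]
        rw [ih m (c :: acc) (by simp at h ⊢; omega)]
        simp [hc]

theorem replace_single (o n : Char) (l : List Char) :
    PySem.Chars.replace l [o] [n] = l.map (fun c => if c = o then n else c) := by
  unfold PySem.Chars.replace
  rw [if_neg (by simp)]
  rw [replace_go_single o n l l.length [] (le_refl _)]
  simp


theorem pvModifyHead_append {α : Type} (f : α → α) (xs ys : List α) (h : xs ≠ []) :
    List.modifyHead f (xs ++ ys) = List.modifyHead f xs ++ ys := by
  cases xs <;> simp_all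

theorem flatMap_split_eq_tok (l : List Char) :
    (pvSplit ';' (l.map (fun c => if c = '\n' then ';' else c))).flatMap (pvSplit ',')
      = pvTok l := by
  induction l with
  | nil => simp [pvSplit, pvTok]
  | cons c t ih =>
    obtain ⟨h, t', hL⟩ := List.exists_cons_of_ne_nil
      (pvSplit_ne_nil ';' (t.map (fun c => if c = '\n' then ';' else c)))
    rw [hL] at ih
    by_cases h1 : c = '\n'
    · subst h1
      rw [show List.map (fun c => if c = '\n' then ';' else c) ('\n' :: t)
            = ';' :: List.map (fun c => if c = '\n' then ';' else c) t from by simp]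
      rw [show pvSplit ';' (';' :: List.map (fun c => if c = '\n' then ';' else c) t)
            = [] :: pvSplit ';' (List.map (fun c => if c = '\n' then ';' else c) t) from by
          simp [pvSplit]]
      rw [hL]
      simp only [List.flatMap_cons] at ih ⊢
      simp [pvSplit, pvTok, pvDelim, ih]
    · by_cases h2 : c = ';'
      · subst h2
        rw [show List.map (fun c => if c = '\n' then ';' else c) (';' :: t)
            = ';' :: List.map (fun c => if c = '\n' then ';' else c) t from by simp [h1]]
        rw [show pvSplit ';' (';' :: List.map (fun c => if c = '\n' then ';' else c) t)
            = [] :: pvSplit ';' (List.map (fun c => if c = '\n' then ';' else c) t) from by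
          simp [pvSplit]]
        rw [hL]
        simp only [List.flatMap_cons] at ih ⊢
        simp [pvSplit, pvTok, pvDelim, ih]
      · rw [show List.map (fun c => if c = '\n' then ';' else c) (c :: t)
            = c :: List.map (fun c => if c = '\n' then ';' else c) t from by simp [h1]]
        rw [show pvSplit ';' (c :: List.map (fun c => if c = '\n' then ';' else c) t)
            = (pvSplit ';' (List.map (fun c => if c = '\n' then ';' else c) t)).modifyHead (c :: ·) from by
          simp [pvSplit, h2]]
        rw [hL]
        simp only [List.modifyHead_cons, List.flatMap_cons] at ih ⊢
        by_cases h3 : c = ','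
        · subst h3
          rw [show pvSplit ',' (',' :: h) = [] :: pvSplit ',' h from by simp [pvSplit]]
          simp only [List.cons_append]
          rw [ih]
          simp [pvTok, pvDelim]
        · rw [show pvSplit ',' (c :: h) = (pvSplit ',' h).modifyHead (c :: ·) from by
            simp [pvSplit, h3]]
          have hd : pvDelim c = false := by simp [pvDelim, h1, h2, h3]
          rw [← pvModifyHead_append _ _ _ (pvSplit_ne_nil ',' h), ih]
          simp [pvTok, hd]

theorem splitOn_go_single (d : Char) (l : List Char) :
    ∀ (fuel : Nat) (cur : List Char) (acc : List (List Char)), l.length < fuel →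
      PySem.Chars.splitOn.go [d] fuel l cur acc
        = acc.reverse ++ (pvSplit d l).modifyHead (cur.reverse ++ ·) := by
  induction l with
  | nil =>
    intro fuel cur acc h
    cases fuel with
    | zero => omega
    | succ n =>
      rw [PySem.Chars.splitOn.go]
      · simp [pvSplit]
      · omega
  | cons c t ih =>
    intro fuel cur acc h
    cases fuel with
    | zero => omega
    | succ n =>
      rw [PySem.Chars.splitOn.go]
      by_cases hc : c = d
      · subst hc
        rw [if_pos (by simp [List.isPrefixOf])]
        have hdrop : List.drop [c].length (c :: t) = t := by simp
        rw [hdrop, ih n [] _ (by simp at h ⊢; omega)]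
        simp only [pvSplit]
        cases pvSplit c t <;> simp
      · rw [if_neg (by simp [List.isPrefixOf]; exact fun hdc => (hc hdc.symm).elim)]
        rw [ih n (c :: cur) acc (by simp at h ⊢; omega)]
        simp only [pvSplit, if_neg hc, List.modifyHead_modifyHead]
        congr 1
        cases pvSplit d t <;> simp


theorem splitOn_single (d : Char) (l : List Char) :
    PySem.Chars.splitOn l [d] = pvSplit d l := by
  unfold PySem.Chars.splitOn
  rw [splitOn_go_single d l (l.length + 1) [] [] (by omega)]
  cases pvSplit d l <;> simp

theorem foldlB (l : List Char) :
    ∀ (out : List (List Char)) (cur : List Char),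
      ((l ++ [';']).foldl
        (fun (st : List (List Char) × List Char) ch =>
          if pvDelim ch then
            (if !(PySem.Chars.strip st.2).isEmpty then st.1 ++ [PySem.Chars.strip st.2] else st.1, [])
          else (st.1, st.2 ++ [ch]))
        (out, cur)).1
      = out ++ (((pvTok l).modifyHead (cur ++ ·)).map PySem.Chars.strip).filter
          (fun t => !t.isEmpty) := by
  induction l with
  | nil =>
    intro out cur
    simp only [List.nil_append, List.foldl_cons, List.foldl_nil,
      show pvDelim ';' = true from rfl, reduceIte]
    simp only [pvTok, List.modifyHead_cons, List.append_nil, List.map_cons, List.map_nil]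
    by_cases h : (PySem.Chars.strip cur).isEmpty <;> simp [List.filter, h]
  | cons c t ih =>
    intro out cur
    by_cases hd : pvDelim c
    · simp only [List.cons_append, List.foldl_cons, hd, reduceIte]
      rw [ih _ []]
      rw [show List.modifyHead (fun x => [] ++ x) (pvTok t) = pvTok t from by
        cases pvTok t <;> simp]
      simp only [pvTok, hd, reduceIte, List.modifyHead_cons, List.append_nil, List.map_cons]
      by_cases h : (PySem.Chars.strip cur).isEmpty <;> simp [h]
    · simp only [List.cons_append, List.foldl_cons, hd, Bool.false_eq_true, reduceIte]
      rw [ih _ (cur ++ [c])]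
      simp only [pvTok, hd, Bool.false_eq_true, reduceIte, List.modifyHead_modifyHead]
      congr 2
      cases pvTok t <;> simp

-- ===== VERDICT (by name: the statement is the Claim_ definition above) =====
theorem split_weekly_folders_py_spec : Claim_equal_split_weekly_folders_py := by
  intro value _
  unfold Spec_split_weekly_folders_py split_weekly_folders_py split_weekly_folders_py_alt
  by_cases hv : value = ""
  · simp [hv]
  · rw [if_neg hv, if_neg hv]
    simp only
    rw [foldlB value.toList [] []]
    rw [replace_single, splitOn_single,
      PySem.List.foldl_append_eq_flatMap (g := fun raw => PySem.Chars.splitOn raw [','])]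
    simp only [List.nil_append, splitOn_single]
    rw [flatMap_split_eq_tok]
    rw [show List.modifyHead (fun x : List Char => x) (pvTok value.toList) = pvTok value.toList from by
      cases pvTok value.toList <;> simp]
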